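-- pv_equiv track=rewrite | github.com/RobinSiep/advent | day8/solution2.py | map_patterns_to_segment_count
-- ===== SOURCE A (Python) =====
-- def map_patterns_to_segment_count(patterns: list[str]) -> dict[int, list[str]]:
--     patterns_by_segment_count = {}
--     for pattern in patterns:
--         segment_count = len(pattern)
--         patterns_by_segment_count[segment_count] = patterns_by_segment_count.get(
--             segment_count, []
--         ) + [pattern]
--
--     return patterns_by_segment_count
-- ===== SOURCE B (Python) =====
-- def map_patterns_to_segment_count(patterns: list[str]) -> dict[int, list[str]]:
--     lengths = dict.fromkeys(len(p) for p in patterns)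
--     return {k: [p for p in patterns if len(p) == k] for k in lengths}
-- ===== Notes on version B (the rewrite author's own statement) =====
-- stated objective: alternative
-- what changed: B replaces A's incremental dict-accumulation (get-default then append per element) with a two-phase pass: collect the distinct lengths in first-occurrence order with dict.fromkeys, then build each group in one filter comprehension per length.
import Mathlib
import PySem

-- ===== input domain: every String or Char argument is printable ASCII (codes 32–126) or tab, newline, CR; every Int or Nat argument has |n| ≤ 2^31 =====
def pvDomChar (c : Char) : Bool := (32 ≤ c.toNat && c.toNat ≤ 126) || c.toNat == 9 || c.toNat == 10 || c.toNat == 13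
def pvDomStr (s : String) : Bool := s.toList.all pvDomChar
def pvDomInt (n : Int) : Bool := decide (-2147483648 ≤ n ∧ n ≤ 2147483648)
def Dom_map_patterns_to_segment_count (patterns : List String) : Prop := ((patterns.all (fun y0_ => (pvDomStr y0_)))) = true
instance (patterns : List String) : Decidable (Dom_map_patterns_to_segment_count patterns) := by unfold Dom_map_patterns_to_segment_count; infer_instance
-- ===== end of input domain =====

-- B groups by distinct lengths (first-occurrence order) with one filter pass per length,
-- instead of A's incremental dict accumulation; same result, alternative decomposition.

-- ===== PORT A =====
def map_patterns_to_segment_count (patterns : List String) : List (Int × List String) :=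
  (patterns.foldl
    (fun d pattern =>
      d.insert (PySem.Str.len pattern) (d.getD (PySem.Str.len pattern) [] ++ [pattern]))
    (PySem.Dict.empty : PySem.Dict Int (List String))).items

-- ===== PORT B =====
def map_patterns_to_segment_count_alt (patterns : List String) : List (Int × List String) :=
  (PySem.List.dedup (patterns.map PySem.Str.len)).map
    (fun k => (k, patterns.filter (fun p => PySem.Str.len p == k)))

-- ===== PRECONDITION & SPEC =====
def Spec_map_patterns_to_segment_count (patterns : List String) (out : List (Int × List String)) : Prop := out = map_patterns_to_segment_count_alt patterns
instance (patterns : List String) (out : List (Int × List String)) : Decidable (Spec_map_patterns_to_segment_count patterns out) := by unfold Spec_map_patterns_to_segment_count; infer_instance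

-- ===== CLAIM (what is proved, stated in full; the proofs are below) =====
def Claim_equal_map_patterns_to_segment_count : Prop := ∀ (patterns : List String), Dom_map_patterns_to_segment_count patterns → Spec_map_patterns_to_segment_count patterns (map_patterns_to_segment_count patterns)

-- ===== LEMMAS AND PROOFS =====

-- getD of A's accumulation loop: the groups are filters of the processed list.
theorem getD_foldl_insert_append {κ α : Type} [BEq κ] [LawfulBEq κ] [DecidableEq κ]
    (key : α → κ) (l : List α) (d : PySem.Dict κ (List α)) (c : κ) :
    (l.foldl (fun d x => d.insert (key x) (d.getD (key x) [] ++ [x])) d).getD c []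
      = d.getD c [] ++ (l.filter (fun x => key x == c)) := by
  induction l generalizing d with
  | nil => simp
  | cons x xs ih =>
    simp only [List.foldl_cons, ih, List.filter_cons, PySem.Dict.getD_insert]
    by_cases h : c = key x
    · simp [h]
    · simp [h, Ne.symm h, beq_iff_eq]

theorem keys_A_loop (patterns : List String) (d : PySem.Dict Int (List String)) :
    (patterns.foldl
      (fun d p => d.insert (PySem.Str.len p) (d.getD (PySem.Str.len p) [] ++ [p])) d).keys
      = PySem.Set.update d.keys (patterns.map PySem.Str.len) :=
  PySem.Dict.keys_foldl_insert_key patterns PySem.Str.len _ d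

theorem map_patterns_to_segment_count_eq_alt (patterns : List String) :
    map_patterns_to_segment_count patterns = map_patterns_to_segment_count_alt patterns := by
  unfold map_patterns_to_segment_count map_patterns_to_segment_count_alt
  set d := patterns.foldl
    (fun d p => d.insert (PySem.Str.len p) (d.getD (PySem.Str.len p) [] ++ [p]))
    (PySem.Dict.empty : PySem.Dict Int (List String)) with hd
  have hnd : d.keys.Nodup := by
    rw [hd]
    exact PySem.Dict.nodup_keys_foldl_insert_key patterns PySem.Str.len _ _
      PySem.Dict.nodup_keys_empty
  have hkeys : d.keys = PySem.List.dedup (patterns.map PySem.Str.len) := by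
    rw [hd, keys_A_loop]
    simp [PySem.Dict.keys_empty, PySem.Set.update_nil_left]
  rw [PySem.Dict.items_eq_map_keys d hnd [], hkeys]
  refine List.map_congr_left (fun k hk => ?_)
  rw [hd, getD_foldl_insert_append PySem.Str.len patterns PySem.Dict.empty k]
  simp

-- ===== VERDICT (by name: the statement is the Claim_ definition above) =====
theorem map_patterns_to_segment_count_spec : Claim_equal_map_patterns_to_segment_count := by
  intro patterns _
  exact map_patterns_to_segment_count_eq_alt patterns
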